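-- pv_equiv track=rewrite | github.com/goldlotus1810/Origin | tools/build_udc/step1_parse_unicode.py | find_block_for_cp
-- ===== SOURCE A (Python) =====
-- def find_block_for_cp(cp, blocks):
--     """Binary search for block containing codepoint."""
--     lo, hi = 0, len(blocks) - 1
--     while lo <= hi:
--         mid = (lo + hi) // 2
--         start, end, _ = blocks[mid]
--         if cp < start:
--             hi = mid - 1
--         elif cp > end:
--             lo = mid + 1
--         else:
--             return blocks[mid]
--     return None
-- ===== SOURCE B (Python) =====
-- def find_block_for_cp(cp, blocks):
--     """Binary search for block containing codepoint, by repeatedly slicing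
--     the candidate segment (no index bookkeeping)."""
--     seg = blocks
--     while seg:
--         mid = (len(seg) - 1) // 2
--         start, end, _ = seg[mid]
--         if cp < start:
--             seg = seg[:mid]
--         elif cp > end:
--             seg = seg[mid + 1:]
--         else:
--             return seg[mid]
--     return None
-- ===== Notes on version B (the rewrite author's own statement) =====
-- stated objective: alternative
-- what changed: A's index-based while loop over mutable lo/hi bounds is replaced by a loop that keeps the current candidate segment itself as a list, probing its relative midpoint (len(seg)-1)//2 and shrinking it by slicing seg[:mid] / seg[mid+1:]; the probe sequence is identical, so results match on every input, sorted or not.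
import Mathlib
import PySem

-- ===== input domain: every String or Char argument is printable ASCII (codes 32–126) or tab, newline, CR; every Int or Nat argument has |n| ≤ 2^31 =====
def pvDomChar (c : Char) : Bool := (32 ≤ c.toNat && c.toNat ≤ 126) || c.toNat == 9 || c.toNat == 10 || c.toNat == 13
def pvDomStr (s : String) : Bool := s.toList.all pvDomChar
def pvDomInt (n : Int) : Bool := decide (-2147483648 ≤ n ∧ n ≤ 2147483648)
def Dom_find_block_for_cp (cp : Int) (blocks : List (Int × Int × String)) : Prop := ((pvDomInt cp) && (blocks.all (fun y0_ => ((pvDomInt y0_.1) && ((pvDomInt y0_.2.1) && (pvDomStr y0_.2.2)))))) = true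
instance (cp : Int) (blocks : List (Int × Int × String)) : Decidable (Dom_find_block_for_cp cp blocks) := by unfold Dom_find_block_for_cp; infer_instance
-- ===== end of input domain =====

-- B replaces A's lo/hi index bookkeeping with a loop on the candidate segment itself,
-- shrunk by slicing around the relative midpoint (objective: alternative decomposition).

-- ===== PORT A =====
-- A's while-loop, state (lo, hi); branches in A's order: cp < start, cp > end, else return
def pvWhileA (cp : Int) (blocks : List (Int × Int × String)) (lo hi : Int) : Option (Int × Int × String) :=
  if _h : lo ≤ hi then
    let mid := PySem.Int.floordiv (lo + hi) 2
    match PySem.List.pyGet? blocks mid with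
    | none => none   -- Python would raise IndexError; unreachable for lo,hi within bounds
    | some b =>
      if cp < b.1 then pvWhileA cp blocks lo (mid - 1)
      else if cp > b.2.1 then pvWhileA cp blocks (mid + 1) hi
      else some b
  else none
termination_by (hi + 1 - lo).toNat
decreasing_by
  · have := PySem.Int.floordiv_two_mid_bounds (lo := lo) (hi := hi) _h; omega
  · have := PySem.Int.floordiv_two_mid_bounds (lo := lo) (hi := hi) _h; omega

def find_block_for_cp (cp : Int) (blocks : List (Int × Int × String)) : Option (Int × Int × String) :=
  pvWhileA cp blocks 0 ((blocks.length : Int) - 1)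

-- ===== PORT B =====
-- B's while-loop on the segment: mid = (len(seg)-1)//2 (a nonnegative int, ported as Nat
-- division, exact here), shrink by slicing seg[:mid] / seg[mid+1:]
def pvSegB (cp : Int) (seg : List (Int × Int × String)) : Option (Int × Int × String) :=
  if seg.isEmpty then none
  else
    let mid : Nat := (seg.length - 1) / 2
    match PySem.List.pyGet? seg (mid : Int) with
    | none => none   -- unreachable: mid < len(seg)
    | some (s, e, name) =>
      if cp < s then pvSegB cp (PySem.List.slice seg none (some (mid : Int)))
      else if cp > e then pvSegB cp (PySem.List.slice seg (some ((mid : Int) + 1)) none)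
      else some (s, e, name)
termination_by seg.length
decreasing_by
  · rw [PySem.List.slice_to_natCast, List.length_take]
    have h1 : 0 < seg.length :=
      List.length_pos_iff.mpr (fun he => (by assumption : ¬ seg.isEmpty = true) (List.isEmpty_iff.mpr he))
    omega
  · rw [← Nat.cast_add_one, PySem.List.slice_from_natCast, List.length_drop]
    have h1 : 0 < seg.length :=
      List.length_pos_iff.mpr (fun he => (by assumption : ¬ seg.isEmpty = true) (List.isEmpty_iff.mpr he))
    omega

def find_block_for_cp_alt (cp : Int) (blocks : List (Int × Int × String)) : Option (Int × Int × String) :=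
  pvSegB cp blocks

-- ===== PRECONDITION & SPEC =====
def Spec_find_block_for_cp (cp : Int) (blocks : List (Int × Int × String)) (out : Option (Int × Int × String)) : Prop := out = find_block_for_cp_alt cp blocks
instance (cp : Int) (blocks : List (Int × Int × String)) (out : Option (Int × Int × String)) : Decidable (Spec_find_block_for_cp cp blocks out) := by unfold Spec_find_block_for_cp; infer_instance

-- ===== CLAIM (what is proved, stated in full; the proofs are below) =====
def Claim_equal_find_block_for_cp : Prop := ∀ (cp : Int) (blocks : List (Int × Int × String)), Dom_find_block_for_cp cp blocks → Spec_find_block_for_cp cp blocks (find_block_for_cp cp blocks)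

-- ===== LEMMAS AND PROOFS =====

-- A's loop at bounds (lo, hi) computes what B's loop computes on the segment blocks[lo..hi].
theorem pvWhileA_eq_pvSegB (cp : Int) (blocks : List (Int × Int × String)) :
    ∀ (n : Nat) (lo hi : Int), (hi + 1 - lo).toNat = n → 0 ≤ lo → hi < (blocks.length : Int) →
      pvWhileA cp blocks lo hi = pvSegB cp ((blocks.drop lo.toNat).take n) := by
  intro n
  induction n using Nat.strong_induction_on with
  | _ n ih =>
    intro lo hi hn hlo hhi
    by_cases hle : lo ≤ hi
    · -- nonempty segment
      have hn1 : 1 ≤ n := by omega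
      set seg := (blocks.drop lo.toNat).take n with hseg
      have hlen : seg.length = n := by
        simp [hseg, List.length_take, List.length_drop]; omega
      have hmid : PySem.Int.floordiv (lo + hi) 2 = lo + (((n - 1) / 2 : Nat) : Int) := by
        rw [PySem.Int.floordiv_eq_ediv_of_pos (by norm_num)]; omega
      set mB : Nat := (n - 1) / 2 with hmB
      have hmBn : mB < n := by omega
      have hmidNat : (lo + (mB : Int)).toNat = lo.toNat + mB := by omega
      have hmidlt : lo.toNat + mB < blocks.length := by omega
      have hgetA : PySem.List.pyGet? blocks (lo + (mB : Int)) = some blocks[lo.toNat + mB] := by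
        rw [PySem.List.pyGet?_eq_some_getElem blocks (by omega) (by omega)]
        simp only [hmidNat]
      have hsegmB : seg[mB]'(by omega) = blocks[lo.toNat + mB] := by
        simp [hseg, List.getElem_take, List.getElem_drop]
      have hgetB : PySem.List.pyGet? seg ((mB : Nat) : Int) = some blocks[lo.toNat + mB] := by
        rw [PySem.List.pyGet?_natCast, List.getElem?_eq_getElem (by omega), hsegmB]
      obtain ⟨s, e, name, hb⟩ : ∃ s e nm, blocks[lo.toNat + mB] = (s, e, nm) := ⟨_, _, _, rfl⟩
      rw [hb] at hgetA hgetB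
      rw [pvWhileA, dif_pos hle]
      rw [pvSegB, if_neg (by simp [List.isEmpty_iff]; intro h; rw [h] at hlen; simp at hlen; omega)]
      simp only [hmid, hgetA, hlen, ← hmB, hgetB]
      by_cases h1 : cp < s
      · rw [if_pos h1, if_pos h1]
        have hrec := ih mB (by omega) lo (lo + (mB : Int) - 1) (by omega) hlo (by omega)
        rw [show lo + (mB : Int) - 1 = (lo + (mB:Int)) - 1 by ring] at hrec ⊢
        rw [hrec, PySem.List.slice_to_natCast, hseg, List.take_take, min_eq_left hmBn.le]
      · rw [if_neg h1, if_neg h1]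
        by_cases h2 : cp > e
        · rw [if_pos h2, if_pos h2]
          have hrec := ih (n - mB - 1) (by omega) (lo + (mB : Int) + 1) hi (by omega) (by omega) hhi
          rw [show lo + (mB : Int) + 1 = (lo + (mB:Int)) + 1 by ring] at hrec ⊢
          rw [hrec, show ((mB : Int) + 1) = (((mB + 1 : Nat) : Int)) by push_cast; ring,
              PySem.List.slice_from_natCast, hseg, List.drop_take, List.drop_drop,
              show (lo + (mB : Int) + 1).toNat = lo.toNat + (mB + 1) from by omega,
              show n - mB - 1 = n - (mB + 1) from by omega]
        · rw [if_neg h2, if_neg h2]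
    · -- empty segment: both return none
      have hn0 : n = 0 := by omega
      rw [pvWhileA, dif_neg hle, hn0]
      simp [pvSegB]

-- ===== VERDICT (by name: the statement is the Claim_ definition above) =====
theorem find_block_for_cp_spec : Claim_equal_find_block_for_cp := by
  intro cp blocks _
  unfold Spec_find_block_for_cp find_block_for_cp find_block_for_cp_alt
  have := pvWhileA_eq_pvSegB cp blocks blocks.length 0 ((blocks.length : Int) - 1)
    (by omega) (by omega) (by omega)
  simpa using this
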